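-- pv_equiv track=rewrite | github.com/im-sg/Intelligent-Career-Guidance-Platform | backend/app/services/ml_role_analyzer.py | _are_skills_equivalent
-- ===== SOURCE A (Python) =====
-- def _are_skills_equivalent(skill1: str, skill2: str) -> bool:
--     """Check if two skills are equivalent"""
--     equivalences = [
--         ("ci/cd", "cicd", "ci cd", "continuous integration"),
--         ("node.js", "nodejs", "node"),
--         ("html/css", "html", "css"),
--         ("rest api", "rest", "restful api", "api"),
--         ("kubernetes", "k8s"),
--         ("machine learning", "ml"),
--         ("deep learning", "dl"),
--         ("natural language processing", "nlp"),
--     ]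
--
--     for equiv_group in equivalences:
--         if skill1 in equiv_group and skill2 in equiv_group:
--             return True
--
--     return False
-- ===== SOURCE B (Python) =====
-- _EQUIVALENCE_GROUPS = [
--     ("ci/cd", "cicd", "ci cd", "continuous integration"),
--     ("node.js", "nodejs", "node"),
--     ("html/css", "html", "css"),
--     ("rest api", "rest", "restful api", "api"),
--     ("kubernetes", "k8s"),
--     ("machine learning", "ml"),
--     ("deep learning", "dl"),
--     ("natural language processing", "nlp"),
-- ]
--
-- # term -> group id, built once; no term belongs to two groups, so equality of ids
-- # is exactly "some group contains both".
-- _GROUP_ID = {term: i for i, group in enumerate(_EQUIVALENCE_GROUPS) for term in group}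
--
--
-- def _are_skills_equivalent(skill1: str, skill2: str) -> bool:
--     """Check if two skills are equivalent"""
--     gid = _GROUP_ID.get(skill1)
--     return gid is not None and gid == _GROUP_ID.get(skill2)
-- ===== Notes on version B (the rewrite author's own statement) =====
-- stated objective: idiomatic
-- what changed: B precomputes a term->group-id dict once and decides equivalence by comparing two O(1) lookups, eliminating A's per-call scan over all groups with two membership tests each.
import Mathlib
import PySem

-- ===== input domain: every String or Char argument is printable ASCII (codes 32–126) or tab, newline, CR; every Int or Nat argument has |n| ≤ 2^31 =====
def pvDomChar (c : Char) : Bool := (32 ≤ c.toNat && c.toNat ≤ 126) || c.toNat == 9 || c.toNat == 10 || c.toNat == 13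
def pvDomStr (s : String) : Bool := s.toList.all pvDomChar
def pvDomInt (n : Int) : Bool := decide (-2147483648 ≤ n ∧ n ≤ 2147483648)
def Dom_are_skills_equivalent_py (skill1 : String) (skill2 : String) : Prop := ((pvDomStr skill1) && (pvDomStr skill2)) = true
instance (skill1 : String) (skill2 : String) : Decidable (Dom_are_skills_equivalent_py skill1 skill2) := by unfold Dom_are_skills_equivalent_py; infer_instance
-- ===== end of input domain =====

-- B builds a term->group-id dict once and compares two lookups; A scans the group list per call.

-- ===== PORT A =====
-- the 'equivalences' list of A
def pvEquivalences : List (List String) :=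
  [ ["ci/cd", "cicd", "ci cd", "continuous integration"],
    ["node.js", "nodejs", "node"],
    ["html/css", "html", "css"],
    ["rest api", "rest", "restful api", "api"],
    ["kubernetes", "k8s"],
    ["machine learning", "ml"],
    ["deep learning", "dl"],
    ["natural language processing", "nlp"] ]

-- the 'for equiv_group in equivalences' loop with its early return
def pvALoop (skill1 : String) (skill2 : String) : List (List String) → Bool
  | [] => false
  | g :: rest => if g.contains skill1 && g.contains skill2 then true else pvALoop skill1 skill2 rest

def are_skills_equivalent_py (skill1 : String) (skill2 : String) : Bool :=
  pvALoop skill1 skill2 pvEquivalences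

-- ===== PORT B =====
-- _GROUP_ID = {term: i for i, group in enumerate(_EQUIVALENCE_GROUPS) for term in group}
-- (the group table is the same literal data as A's; shared here as pvEquivalences)
def pvGroupId : PySem.Dict String Int :=
  (PySem.List.enumerate pvEquivalences 0).foldl
    (fun d p => p.2.foldl (fun d t => d.insert t p.1) d) PySem.Dict.empty

def are_skills_equivalent_py_alt (skill1 : String) (skill2 : String) : Bool :=
  match pvGroupId.get? skill1 with
  | none => false
  | some gid => pvGroupId.get? skill2 == some gid

-- ===== PRECONDITION & SPEC =====
def Spec_are_skills_equivalent_py (skill1 : String) (skill2 : String) (out : Bool) : Prop := out = are_skills_equivalent_py_alt skill1 skill2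
instance (skill1 : String) (skill2 : String) (out : Bool) : Decidable (Spec_are_skills_equivalent_py skill1 skill2 out) := by unfold Spec_are_skills_equivalent_py; infer_instance

-- ===== CLAIM (what is proved, stated in full; the proofs are below) =====
def Claim_equal_are_skills_equivalent_py : Prop := ∀ (skill1 : String) (skill2 : String), Dom_are_skills_equivalent_py skill1 skill2 → Spec_are_skills_equivalent_py skill1 skill2 (are_skills_equivalent_py skill1 skill2)

-- ===== LEMMAS AND PROOFS =====

-- the id the dict ends up assigning to s when groups gs are inserted starting at index i
-- (later groups overwrite earlier ones, hence the orElse shape)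
def pvFindIdx (s : String) : List (List String) → Int → Option Int
  | [], _ => none
  | g :: rest, i =>
      match pvFindIdx s rest (i + 1) with
      | some j => some j
      | none => if s ∈ g then some i else none

lemma pvInsertGroup_get? (g : List String) (d : PySem.Dict String Int) (i : Int) (s : String) :
    (g.foldl (fun d t => d.insert t i) d).get? s = if s ∈ g then some i else d.get? s := by
  induction g generalizing d with
  | nil => simp
  | cons t g ih =>
      simp only [List.foldl_cons, ih, List.mem_cons, PySem.Dict.get?_insert]
      by_cases h1 : s ∈ g <;> by_cases h2 : s = t <;> simp [h1, h2]

lemma pvBuild_get? (gs : List (List String)) (i : Int) (d : PySem.Dict String Int) (s : String) :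
    ((PySem.List.enumerate gs i).foldl
        (fun d p => p.2.foldl (fun d t => d.insert t p.1) d) d).get? s =
      (pvFindIdx s gs i).or (d.get? s) := by
  induction gs generalizing i d with
  | nil => simp [PySem.List.enumerate_nil, pvFindIdx]
  | cons g rest ih =>
      rw [PySem.List.enumerate_cons, List.foldl_cons, ih, pvFindIdx]
      cases h : pvFindIdx s rest (i + 1) with
      | some j => simp
      | none => simp [pvInsertGroup_get?]; by_cases hm : s ∈ g <;> simp [hm]

lemma pvFindIdx_ge (s : String) (gs : List (List String)) (i j : Int)
    (h : pvFindIdx s gs i = some j) : i ≤ j := by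
  induction gs generalizing i with
  | nil => simp [pvFindIdx] at h
  | cons g rest ih =>
      cases h' : pvFindIdx s rest (i + 1) with
      | some k =>
          simp only [pvFindIdx, h', Option.some.injEq] at h
          rw [h] at h'
          have := ih (i + 1) h'
          omega
      | none =>
          simp only [pvFindIdx, h'] at h
          by_cases hm : s ∈ g <;> simp [hm] at h
          omega

lemma pvFindIdx_none (s : String) (gs : List (List String)) (i : Int)
    (h : ∀ g ∈ gs, s ∉ g) : pvFindIdx s gs i = none := by
  induction gs generalizing i with
  | nil => rfl
  | cons g rest ih =>
      simp only [pvFindIdx, ih (i + 1) (fun g' hg' => h g' (List.mem_cons_of_mem _ hg'))]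
      simp [h g (List.mem_cons_self)]

lemma pvALoop_false (s1 s2 : String) (gs : List (List String))
    (h : ∀ g ∈ gs, s1 ∉ g ∨ s2 ∉ g) : pvALoop s1 s2 gs = false := by
  induction gs with
  | nil => rfl
  | cons g rest ih =>
      have hg := h g (List.mem_cons_self)
      have : (g.contains s1 && g.contains s2) = false := by
        rcases hg with hg | hg <;> simp [List.contains_eq_mem, hg]
      simp only [pvALoop, this, Bool.false_eq_true, if_false]
      exact ih (fun g' hg' => h g' (List.mem_cons_of_mem _ hg'))

-- core equivalence, generic in the group list with pairwise-disjoint groups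
lemma pvLoop_eq_findIdx (s1 s2 : String) (gs : List (List String)) (i : Int)
    (hd : gs.Pairwise (fun a b => ∀ t, t ∈ a → t ∉ b)) :
    pvALoop s1 s2 gs =
      (match pvFindIdx s1 gs i with
       | none => false
       | some gid => pvFindIdx s2 gs i == some gid) := by
  induction gs generalizing i with
  | nil => rfl
  | cons g rest ih =>
      rcases List.pairwise_cons.mp hd with ⟨hdis, hrest⟩
      have notin : ∀ s, s ∈ g → ∀ g' ∈ rest, s ∉ g' := fun s hs g' hg' => hdis g' hg' s hs
      by_cases h1 : s1 ∈ g <;> by_cases h2 : s2 ∈ g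
      · -- both in g: loop returns true, both ids are i
        have f1 : pvFindIdx s1 (g :: rest) i = some i := by
          simp [pvFindIdx, pvFindIdx_none s1 rest (i + 1) (notin s1 h1), h1]
        have f2 : pvFindIdx s2 (g :: rest) i = some i := by
          simp [pvFindIdx, pvFindIdx_none s2 rest (i + 1) (notin s2 h2), h2]
        simp [pvALoop, List.contains_eq_mem, h1, h2, f1, f2]
      · -- s1 in g, s2 not: loop skips g and never finds s1 again; ids differ
        have f1 : pvFindIdx s1 (g :: rest) i = some i := by
          simp [pvFindIdx, pvFindIdx_none s1 rest (i + 1) (notin s1 h1), h1]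
        have l : pvALoop s1 s2 (g :: rest) = false := by
          apply pvALoop_false
          intro g' hg'
          rcases List.mem_cons.mp hg' with rfl | hg'
          · exact Or.inr h2
          · exact Or.inl (notin s1 h1 g' hg')
        rw [l, f1]
        have : pvFindIdx s2 (g :: rest) i ≠ some i := by
          intro hc
          simp only [pvFindIdx] at hc
          cases h' : pvFindIdx s2 rest (i + 1) with
          | some k =>
              rw [h'] at hc
              have := pvFindIdx_ge s2 rest (i + 1) k h'
              simp at hc; omega
          | none => rw [h'] at hc; simp [h2] at hc
        simp [this]
      · -- s2 in g, s1 not: symmetric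
        have f2 : pvFindIdx s2 (g :: rest) i = some i := by
          simp [pvFindIdx, pvFindIdx_none s2 rest (i + 1) (notin s2 h2), h2]
        have l : pvALoop s1 s2 (g :: rest) = false := by
          apply pvALoop_false
          intro g' hg'
          rcases List.mem_cons.mp hg' with rfl | hg'
          · exact Or.inl h1
          · exact Or.inr (notin s2 h2 g' hg')
        rw [l]
        have e1 : pvFindIdx s1 (g :: rest) i = pvFindIdx s1 rest (i + 1) := by
          simp only [pvFindIdx]
          cases h' : pvFindIdx s1 rest (i + 1) <;> simp [h1]
        rw [e1, f2]
        cases h' : pvFindIdx s1 rest (i + 1) with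
        | none => rfl
        | some k =>
            have := pvFindIdx_ge s1 rest (i + 1) k h'
            have : (some i == some k) = false := by simp; omega
            simp [this]
      · -- neither in g: both sides recurse
        have e1 : pvFindIdx s1 (g :: rest) i = pvFindIdx s1 rest (i + 1) := by
          simp only [pvFindIdx]
          cases h' : pvFindIdx s1 rest (i + 1) <;> simp [h1]
        have e2 : pvFindIdx s2 (g :: rest) i = pvFindIdx s2 rest (i + 1) := by
          simp only [pvFindIdx]
          cases h' : pvFindIdx s2 rest (i + 1) <;> simp [h2]
        have lc : (g.contains s1 && g.contains s2) = false := by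
          simp [List.contains_eq_mem, h1]
        simp only [pvALoop, lc, Bool.false_eq_true, if_false, e1, e2]
        exact ih (i + 1) hrest

lemma pvGroupId_get? (s : String) : pvGroupId.get? s = pvFindIdx s pvEquivalences 0 := by
  rw [pvGroupId, pvBuild_get?]
  simp

lemma pvDisjoint : pvEquivalences.Pairwise (fun a b => ∀ t, t ∈ a → t ∉ b) := by decide

-- ===== VERDICT (by name: the statement is the Claim_ definition above) =====
theorem are_skills_equivalent_py_spec : Claim_equal_are_skills_equivalent_py := by
  intro s1 s2 _
  unfold Spec_are_skills_equivalent_py are_skills_equivalent_py are_skills_equivalent_py_alt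
  rw [pvGroupId_get? s1, pvGroupId_get? s2]
  exact pvLoop_eq_findIdx s1 s2 pvEquivalences 0 pvDisjoint
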